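-- pv_equiv track=rewrite | github.com/daniel-iova/UniversityWork | OOP/Homework 1 - Polygon App/polygon_functions.py | minimum_area_rectangle
-- ===== SOURCE A (Python) =====
-- def minimum_area_rectangle(polygon):
--     left_bottom = [min(point[0] for point in polygon), min(point[1] for point in polygon)]
--     right_top = [max(point[0] for point in polygon), max(point[1] for point in polygon)]
--
--     return [[left_bottom[0], right_top[1]],
--             [right_top[0], right_top[1]],
--             [right_top[0], left_bottom[1]],
--             [left_bottom[0], left_bottom[1]]
--             ]
-- ===== SOURCE B (Python) =====
-- def minimum_area_rectangle(polygon):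
--     xs = sorted(point[0] for point in polygon)
--     ys = sorted(point[1] for point in polygon)
--     return [[xs[0], ys[-1]],
--             [xs[-1], ys[-1]],
--             [xs[-1], ys[0]],
--             [xs[0], ys[0]]]
-- ===== Notes on version B (the rewrite author's own statement) =====
-- stated objective: alternative
-- what changed: Replaces A's four min/max generator scans with a sort-then-pick algorithm: sort the x- and y-coordinate lists once each and read the extrema off the ends of the sorted lists.
import Mathlib
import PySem

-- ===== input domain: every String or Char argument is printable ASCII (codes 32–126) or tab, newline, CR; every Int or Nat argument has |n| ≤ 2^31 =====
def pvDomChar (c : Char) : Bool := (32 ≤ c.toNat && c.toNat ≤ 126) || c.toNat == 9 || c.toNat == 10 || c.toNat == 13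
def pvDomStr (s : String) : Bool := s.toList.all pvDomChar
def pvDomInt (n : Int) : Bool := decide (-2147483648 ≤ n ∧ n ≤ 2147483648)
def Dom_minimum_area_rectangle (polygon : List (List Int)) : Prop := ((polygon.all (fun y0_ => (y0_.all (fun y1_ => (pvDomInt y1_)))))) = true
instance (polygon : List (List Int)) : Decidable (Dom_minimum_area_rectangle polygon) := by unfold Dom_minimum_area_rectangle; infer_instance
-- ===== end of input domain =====

-- B replaces A's four min/max generator scans by sorting the x- and y-coordinate lists and reading the extrema off the sorted ends (alternative algorithm, O(n log n) vs O(n)).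


-- ===== PORT A =====
-- point[0] / point[1] via pyGet?; the .getD 0 only totalises out-of-range access, which Pre_ excludes
def pvX (p : List Int) : Int := (PySem.List.pyGet? p 0).getD 0
def pvY (p : List Int) : Int := (PySem.List.pyGet? p 1).getD 0

def minimum_area_rectangle (polygon : List (List Int)) : List (List Int) :=
  let left_bottom := [(PySem.List.min? (polygon.map pvX) (fun v => v)).getD 0,
                      (PySem.List.min? (polygon.map pvY) (fun v => v)).getD 0]
  let right_top := [(PySem.List.max? (polygon.map pvX) (fun v => v)).getD 0,
                    (PySem.List.max? (polygon.map pvY) (fun v => v)).getD 0]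
  [[left_bottom[0]!, right_top[1]!],
   [right_top[0]!, right_top[1]!],
   [right_top[0]!, left_bottom[1]!],
   [left_bottom[0]!, left_bottom[1]!]]

-- ===== PORT B =====
-- xs = sorted(coords); xs[0] / xs[-1] via pyGet?; the .getD 0 only totalises the empty case, which Pre_ excludes
def minimum_area_rectangle_alt (polygon : List (List Int)) : List (List Int) :=
  let xs := PySem.List.sorted (polygon.map pvX) (fun v => v) false
  let ys := PySem.List.sorted (polygon.map pvY) (fun v => v) false
  [[(PySem.List.pyGet? xs 0).getD 0, (PySem.List.pyGet? ys (-1)).getD 0],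
   [(PySem.List.pyGet? xs (-1)).getD 0, (PySem.List.pyGet? ys (-1)).getD 0],
   [(PySem.List.pyGet? xs (-1)).getD 0, (PySem.List.pyGet? ys 0).getD 0],
   [(PySem.List.pyGet? xs 0).getD 0, (PySem.List.pyGet? ys 0).getD 0]]

-- ===== PRECONDITION & SPEC =====
-- Pre_ excludes exactly the inputs where A raises: the empty polygon (ValueError) and points with fewer than 2 coordinates (IndexError)
def Pre_minimum_area_rectangle (polygon : List (List Int)) : Prop :=
  polygon ≠ [] ∧ (polygon.all (fun p => 2 ≤ p.length)) = true
instance (polygon : List (List Int)) : Decidable (Pre_minimum_area_rectangle polygon) := by unfold Pre_minimum_area_rectangle; infer_instance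
def pvWitness_minimum_area_rectangle : List (List Int) := [[0, 3], [2, 1], [-1, 0]]

def Spec_minimum_area_rectangle (polygon : List (List Int)) (out : List (List Int)) : Prop := out = minimum_area_rectangle_alt polygon
instance (polygon : List (List Int)) (out : List (List Int)) : Decidable (Spec_minimum_area_rectangle polygon out) := by unfold Spec_minimum_area_rectangle; infer_instance

-- ===== CLAIM =====
def Claim_equal_minimum_area_rectangle : Prop := ∀ (polygon : List (List Int)), Dom_minimum_area_rectangle polygon → Pre_minimum_area_rectangle polygon → Spec_minimum_area_rectangle polygon (minimum_area_rectangle polygon)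

-- ===== LEMMAS AND PROOFS =====
-- head of the sorted list is min(l): both are members ≤ every element
theorem sorted_head_eq_min (l : List Int) (h : l ≠ []) :
    (PySem.List.pyGet? (PySem.List.sorted l (fun v => v) false) 0).getD 0
      = (PySem.List.min? l (fun v => v)).getD 0 := by
  obtain ⟨m, t, hs⟩ := List.exists_cons_of_ne_nil
    (fun e => h ((PySem.List.sorted_eq_nil_iff l (fun v => v) false).mp e))
  obtain ⟨mn, hmn⟩ : ∃ mn, PySem.List.min? l (fun v => v) = some mn := by
    cases hm : PySem.List.min? l (fun v => v) with
    | none => exact absurd ((PySem.List.min?_eq_none_iff l (fun v => v)).mp hm) h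
    | some mn => exact ⟨mn, rfl⟩
  rw [hs, PySem.List.pyGet?_zero_cons, hmn]
  simp only [Option.getD_some]
  have hmem : m ∈ l := by
    have := (PySem.List.mem_sorted l (fun v => v) false m).mp
    rw [hs] at this; exact this (by simp)
  exact le_antisymm
    (PySem.List.key_head_sorted_le l (fun v => v) hs mn (PySem.List.min?_mem hmn))
    (PySem.List.min?_isMin hmn m hmem)

-- every element of a ≤-pairwise list is ≤ its last element
theorem pairwise_le_getLast (l : List Int) (hp : l.Pairwise (· ≤ ·)) (y : Int) (hy : y ∈ l)
    (h : l ≠ []) : y ≤ l.getLast h := by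
  induction l with
  | nil => cases hy
  | cons a t ih =>
    cases t with
    | nil => simp at hy; simp [hy, List.getLast]
    | cons b u =>
      have hpt : (b :: u).Pairwise (· ≤ ·) := hp.of_cons
      have hlast : (a :: b :: u).getLast h = (b :: u).getLast (by simp) := by
        simp [List.getLast]
      rcases List.mem_cons.mp hy with hy | hy
      · subst hy
        rw [hlast]
        exact List.rel_of_pairwise_cons hp (List.getLast_mem (l := b :: u) (by simp))
      · rw [hlast]; exact ih hpt hy (by simp)

-- last of the sorted list is max(l)
theorem sorted_last_eq_max (l : List Int) (h : l ≠ []) :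
    (PySem.List.pyGet? (PySem.List.sorted l (fun v => v) false) (-1)).getD 0
      = (PySem.List.max? l (fun v => v)).getD 0 := by
  have hsne : PySem.List.sorted l (fun v => v) false ≠ [] :=
    fun e => h ((PySem.List.sorted_eq_nil_iff l (fun v => v) false).mp e)
  obtain ⟨mx, hmx⟩ : ∃ mx, PySem.List.max? l (fun v => v) = some mx := by
    cases hm : PySem.List.max? l (fun v => v) with
    | none => exact absurd ((PySem.List.max?_eq_none_iff l (fun v => v)).mp hm) h
    | some mx => exact ⟨mx, rfl⟩
  rw [PySem.List.pyGet?_neg_one, List.getLast?_eq_some_getLast hsne, hmx]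
  simp only [Option.getD_some]
  set s := PySem.List.sorted l (fun v => v) false with hs
  have hperm : ∀ y, y ∈ s ↔ y ∈ l := fun y =>
    PySem.List.mem_sorted l (fun v => v) false y
  have hlast_mem : s.getLast hsne ∈ l := (hperm _).mp (List.getLast_mem hsne)
  have hpw : s.Pairwise (· ≤ ·) := by
    simpa using PySem.List.sorted_pairwise l (fun v => v)
  exact le_antisymm
    (PySem.List.max?_isMax hmx _ hlast_mem)
    (pairwise_le_getLast s hpw mx ((hperm mx).mpr (PySem.List.max?_mem hmx)) hsne)

-- ===== VERDICT =====
theorem minimum_area_rectangle_spec : Claim_equal_minimum_area_rectangle := by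
  intro polygon _ hpre
  obtain ⟨hne, _⟩ := hpre
  unfold Spec_minimum_area_rectangle
  have hx : polygon.map pvX ≠ [] := by simpa using hne
  have hy : polygon.map pvY ≠ [] := by simpa using hne
  simp only [minimum_area_rectangle, minimum_area_rectangle_alt,
    sorted_head_eq_min _ hx, sorted_head_eq_min _ hy,
    sorted_last_eq_max _ hx, sorted_last_eq_max _ hy]
  simp
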